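-- pv_equiv track=rewrite | github.com/tjthejuggler/py_habits_widget | habitdb_streak_finder.py | format_extra_data_dict
-- ===== SOURCE A (Python) =====
-- def format_extra_data_dict(unusual_experience_dict):
--     '''
--     Takes dicts in this format:
--     "2023-03-19 10:00:17": "landauer limit - new anki card",
--     "2023-03-19 12:00:18": "burping - new anki card",
--     and outputs in this format:
--     "2023-03-19": ["10:00:17 landauer limit - new anki card", "12:00:18 burping - new anki card"]
--     '''
--     new_dict = {}
--     for key, value in unusual_experience_dict.items():
--         date_str, time_str = key.split(' ')
--         formatted_value = f"{time_str} {value}"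
--         if date_str in new_dict:
--             new_dict[date_str].append(formatted_value)
--         else:
--             new_dict[date_str] = [formatted_value]
--
--     return new_dict
-- ===== SOURCE B (Python) =====
-- def format_extra_data_dict(unusual_experience_dict):
--     # flatten once: (date, "time value") triples in input order
--     triples = []
--     for key, value in unusual_experience_dict.items():
--         date_str, time_str = key.split(' ')
--         triples.append((date_str, f"{time_str} {value}"))
--     # distinct dates in first-occurrence order, then gather per date
--     dates = dict.fromkeys(d for d, _ in triples)
--     return {d: [v for d2, v in triples if d2 == d] for d in dates}
-- ===== Notes on version B (the rewrite author's own statement) =====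
-- stated objective: alternative
-- what changed: Replaces A's single-pass mutable-dict grouping (membership test + append-or-create per item) by a flatten-once pass building (date, 'time value') triples, then gathering values per distinct first-occurrence date with a comprehension.
import Mathlib
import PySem

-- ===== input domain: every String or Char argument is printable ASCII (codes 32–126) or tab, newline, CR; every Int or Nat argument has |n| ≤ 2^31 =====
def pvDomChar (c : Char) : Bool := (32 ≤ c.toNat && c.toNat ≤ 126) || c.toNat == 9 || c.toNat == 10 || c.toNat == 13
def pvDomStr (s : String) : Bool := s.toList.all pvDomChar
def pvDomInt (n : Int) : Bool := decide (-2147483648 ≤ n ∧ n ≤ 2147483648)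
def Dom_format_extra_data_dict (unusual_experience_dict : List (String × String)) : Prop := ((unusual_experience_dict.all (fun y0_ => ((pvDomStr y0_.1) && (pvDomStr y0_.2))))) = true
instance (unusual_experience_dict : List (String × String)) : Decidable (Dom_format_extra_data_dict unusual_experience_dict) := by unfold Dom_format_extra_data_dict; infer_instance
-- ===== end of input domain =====

-- B replaces A's single-pass dict accumulation by flatten-once + gather-per-distinct-date (alternative decomposition, same results).

-- ===== PORT A =====
def format_extra_data_dict (unusual_experience_dict : List (String × String)) : List (String × List String) :=
  (unusual_experience_dict.foldl (fun new_dict kv =>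
      match PySem.Str.split? kv.1 " " with
      | some [date_str, time_str] =>
          let formatted_value := time_str ++ " " ++ kv.2
          if new_dict.contains date_str then
            new_dict.modify date_str [] (fun vs => vs ++ [formatted_value])
          else
            new_dict.insert date_str [formatted_value]
      | _ => new_dict)   -- unreachable under Pre_ (Python raises ValueError on unpacking)
    PySem.Dict.empty).items

-- ===== PORT B =====
def format_extra_data_dict_alt (unusual_experience_dict : List (String × String)) : List (String × List String) :=
  let triples := unusual_experience_dict.foldl (fun acc kv =>
      let parts := (PySem.Str.split? kv.1 " ").getD []   -- sep " " ≠ "", so split? is never none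
      -- the two-name unpacking succeeds exactly when parts has length 2 (else Python raises, outside Pre_)
      if parts.length == 2 then
        acc ++ [(parts.getD 0 "", parts.getD 1 "" ++ " " ++ kv.2)]
      else acc)
    []
  let dates := PySem.List.dedup (triples.map Prod.fst)
  dates.map (fun d => (d, (triples.filter (fun p => p.1 == d)).map Prod.snd))

-- ===== PRECONDITION & SPEC =====
-- Pre_ excludes inputs where some key does not contain exactly one space: there key.split(' ') yields
-- a list of length ≠ 2 and the two-variable unpacking in A (and B) raises ValueError.
def Pre_format_extra_data_dict (unusual_experience_dict : List (String × String)) : Prop :=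
  ∀ kv ∈ unusual_experience_dict, (PySem.Str.split? kv.1 " ").map List.length = some 2
instance (unusual_experience_dict : List (String × String)) : Decidable (Pre_format_extra_data_dict unusual_experience_dict) := by unfold Pre_format_extra_data_dict; infer_instance

def pvWitness_format_extra_data_dict : (List (String × String)) :=
  [("2023-03-19 10:00:17", "landauer limit - new anki card"),
   ("2023-03-19 12:00:18", "burping - new anki card")]

def Spec_format_extra_data_dict (unusual_experience_dict : List (String × String)) (out : List (String × List String)) : Prop := out = format_extra_data_dict_alt unusual_experience_dict
instance (unusual_experience_dict : List (String × String)) (out : List (String × List String)) : Decidable (Spec_format_extra_data_dict unusual_experience_dict out) := by unfold Spec_format_extra_data_dict; infer_instance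

-- ===== CLAIM (what is proved, stated in full; the proofs are below) =====
def Claim_equal_format_extra_data_dict : Prop := ∀ (unusual_experience_dict : List (String × String)), Dom_format_extra_data_dict unusual_experience_dict → Pre_format_extra_data_dict unusual_experience_dict → Spec_format_extra_data_dict unusual_experience_dict (format_extra_data_dict unusual_experience_dict)

-- ===== LEMMAS AND PROOFS =====

-- the flat list of (date, "time value") pairs both programs are ultimately grouping
def pvTrip (l : List (String × String)) : List (String × String) :=
  l.filterMap (fun kv =>
    match PySem.Str.split? kv.1 " " with
    | some [date_str, time_str] => some (date_str, time_str ++ " " ++ kv.2)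
    | _ => none)

theorem pv_modify_not_contains (d : PySem.Dict String (List String)) (k v : String)
    (h : d.contains k = false) : d.modify k [] (· ++ [v]) = d.insert k [v] := by
  unfold PySem.Dict.modify
  rw [PySem.Dict.getD_of_not_contains]
  · simp
  · exact h

theorem pv_A_fold (l : List (String × String)) (d : PySem.Dict String (List String)) :
    l.foldl (fun new_dict kv =>
      match PySem.Str.split? kv.1 " " with
      | some [date_str, time_str] =>
          let formatted_value := time_str ++ " " ++ kv.2
          if new_dict.contains date_str then
            new_dict.modify date_str [] (fun vs => vs ++ [formatted_value])
          else
            new_dict.insert date_str [formatted_value]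
      | _ => new_dict) d
    = (pvTrip l).foldl (fun d p => d.modify p.1 [] (fun vs => vs ++ [p.2])) d := by
  induction l generalizing d with
  | nil => simp [pvTrip]
  | cons kv l ih =>
    rcases hs : PySem.Str.split? kv.1 " " with _ | ⟨_ | ⟨a, _ | ⟨b, _ | _⟩⟩⟩ <;>
      simp only [pvTrip, List.filterMap_cons, List.foldl_cons, hs] <;>
      rw [ih] <;> try rfl
    congr 1
    by_cases hc : (d.contains a : Bool)
    · simp [hc]
    · simp only [Bool.not_eq_true] at hc
      rw [if_neg (by simp [hc]), pv_modify_not_contains d a _ hc]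

theorem pv_B_fold (l : List (String × String)) (acc : List (String × String)) :
    l.foldl (fun acc kv =>
      let parts := (PySem.Str.split? kv.1 " ").getD []
      if parts.length == 2 then
        acc ++ [(parts.getD 0 "", parts.getD 1 "" ++ " " ++ kv.2)]
      else acc) acc
    = acc ++ pvTrip l := by
  induction l generalizing acc with
  | nil => simp [pvTrip]
  | cons kv l ih =>
    rcases hs : PySem.Str.split? kv.1 " " with _ | ⟨_ | ⟨a, _ | ⟨b, _ | _⟩⟩⟩ <;>
      simp only [pvTrip, List.filterMap_cons, List.foldl_cons, hs] <;>
      rw [ih] <;> simp [pvTrip]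

-- ===== VERDICT (by name: the statement is the Claim_ definition above) =====
theorem format_extra_data_dict_spec : Claim_equal_format_extra_data_dict := by
  intro l _ _
  unfold Spec_format_extra_data_dict format_extra_data_dict format_extra_data_dict_alt
  rw [pv_A_fold, pv_B_fold]
  simp only [List.nil_append]
  have hnd : ((pvTrip l).foldl (fun d p => d.modify p.1 [] (fun vs => vs ++ [p.2]))
      PySem.Dict.empty).keys.Nodup :=
    PySem.Dict.nodup_keys_foldl_modify_key (pvTrip l) Prod.fst [] (fun _ p vs => vs ++ [p.2])
      PySem.Dict.empty (by simp)
  rw [PySem.Dict.items_eq_map_keys _ hnd []]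
  rw [PySem.Dict.keys_foldl_modify_key]
  simp only [PySem.Dict.keys_empty, PySem.Set.update_nil_left, PySem.List.dedup_eq_ofList]
  apply List.map_congr_left
  intro k _
  rw [PySem.Dict.getD_foldl_modify_append]
  simp [PySem.Dict.getD_empty]
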